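-- pv_equiv track=rewrite | github.com/JoaquinZubiri/Tp-Geneticos-Investigacion | funciones.py | nuevoIndice
-- ===== SOURCE A (Python) =====
-- def nuevoIndice(alcista, signoPositivo, indicePrecio, intervaloPrecio, puntoRecorte):
--     if(alcista and signoPositivo):
--         coleccion_indices = []
--         for i in range(0, puntoRecorte):
--             coleccion_indices.append(i)
--     elif(alcista and not signoPositivo):
--         coleccion_indices = []
--         for i in range(0, len(intervaloPrecio)-puntoRecorte):
--             coleccion_indices.append(i)
--     elif(not alcista and signoPositivo):
--         coleccion_indices = []
--         for i in range(0, len(intervaloPrecio)-puntoRecorte):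
--             coleccion_indices.append(i)
--     elif(not alcista and not signoPositivo):
--         coleccion_indices = []
--         for i in range(0, puntoRecorte):
--             coleccion_indices.append(i)
--
--     nuevo_arreglo = []
--     for indice in coleccion_indices:
--         conteo = indicePrecio.count(indice)
--         nuevo_arreglo.extend([indice] * conteo)
--
--     return nuevo_arreglo
-- ===== SOURCE B (Python) =====
-- def nuevoIndice(alcista, signoPositivo, indicePrecio, intervaloPrecio, puntoRecorte):
--     if bool(alcista) == bool(signoPositivo):
--         limite = puntoRecorte
--     else:
--         limite = len(intervaloPrecio) - puntoRecorte
--     return sorted(int(x) for x in indicePrecio if 0 <= x < limite)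
-- ===== Notes on version B (the rewrite author's own statement) =====
-- stated objective: faster
-- what changed: Collapses the 4-way flag branch into one limit and replaces the count-per-index scan over range(limite) (an O(limite*n) counting pass) by a single filter of indicePrecio followed by a comparison sort.
import Mathlib
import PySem

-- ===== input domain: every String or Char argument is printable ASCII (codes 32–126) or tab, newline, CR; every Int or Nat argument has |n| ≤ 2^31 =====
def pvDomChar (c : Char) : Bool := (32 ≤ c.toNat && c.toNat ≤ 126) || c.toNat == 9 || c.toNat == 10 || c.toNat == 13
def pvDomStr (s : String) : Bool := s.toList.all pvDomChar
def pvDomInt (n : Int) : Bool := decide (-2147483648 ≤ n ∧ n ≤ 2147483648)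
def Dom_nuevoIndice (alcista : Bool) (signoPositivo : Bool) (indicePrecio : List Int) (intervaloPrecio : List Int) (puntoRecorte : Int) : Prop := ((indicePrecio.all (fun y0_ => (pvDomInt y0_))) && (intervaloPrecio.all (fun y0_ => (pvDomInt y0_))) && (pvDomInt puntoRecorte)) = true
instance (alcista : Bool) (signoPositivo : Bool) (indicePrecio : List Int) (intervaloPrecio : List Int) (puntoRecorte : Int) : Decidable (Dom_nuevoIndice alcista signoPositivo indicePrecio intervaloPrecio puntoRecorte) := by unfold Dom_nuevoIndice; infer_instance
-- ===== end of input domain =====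

-- B collapses A's 4-way flag branch into one limit and replaces the per-index counting
-- scan over range(limite) by a filter of indicePrecio followed by a comparison sort (objective: simpler).

-- ===== PORT A =====
def nuevoIndice (alcista : Bool) (signoPositivo : Bool) (indicePrecio : List Int) (intervaloPrecio : List Int) (puntoRecorte : Int) : List Int :=
  let coleccion_indices : List Int :=
    if alcista && signoPositivo then
      (PySem.List.pyRange 0 puntoRecorte 1).foldl (fun acc i => acc ++ [i]) []
    else if alcista && !signoPositivo then
      (PySem.List.pyRange 0 ((intervaloPrecio.length : Int) - puntoRecorte) 1).foldl (fun acc i => acc ++ [i]) []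
    else if !alcista && signoPositivo then
      (PySem.List.pyRange 0 ((intervaloPrecio.length : Int) - puntoRecorte) 1).foldl (fun acc i => acc ++ [i]) []
    else
      (PySem.List.pyRange 0 puntoRecorte 1).foldl (fun acc i => acc ++ [i]) []
  coleccion_indices.foldl
    (fun nuevo_arreglo indice =>
      let conteo := PySem.List.count indicePrecio indice
      nuevo_arreglo ++ List.replicate conteo indice) []

-- ===== PORT B =====
def nuevoIndice_alt (alcista : Bool) (signoPositivo : Bool) (indicePrecio : List Int) (intervaloPrecio : List Int) (puntoRecorte : Int) : List Int :=
  let limite : Int := if alcista == signoPositivo then puntoRecorte else (intervaloPrecio.length : Int) - puntoRecorte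
  PySem.List.sorted (indicePrecio.filter (fun x => decide (0 ≤ x) && decide (x < limite))) (fun x => x) false

-- ===== PRECONDITION & SPEC =====
def Spec_nuevoIndice (alcista : Bool) (signoPositivo : Bool) (indicePrecio : List Int) (intervaloPrecio : List Int) (puntoRecorte : Int) (out : List Int) : Prop := out = nuevoIndice_alt alcista signoPositivo indicePrecio intervaloPrecio puntoRecorte
instance (alcista : Bool) (signoPositivo : Bool) (indicePrecio : List Int) (intervaloPrecio : List Int) (puntoRecorte : Int) (out : List Int) : Decidable (Spec_nuevoIndice alcista signoPositivo indicePrecio intervaloPrecio puntoRecorte out) := by unfold Spec_nuevoIndice; infer_instance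

-- ===== CLAIM (what is proved, stated in full; the proofs are below) =====
def Claim_equal_nuevoIndice : Prop := ∀ (alcista : Bool) (signoPositivo : Bool) (indicePrecio : List Int) (intervaloPrecio : List Int) (puntoRecorte : Int), Dom_nuevoIndice alcista signoPositivo indicePrecio intervaloPrecio puntoRecorte → Spec_nuevoIndice alcista signoPositivo indicePrecio intervaloPrecio puntoRecorte (nuevoIndice alcista signoPositivo indicePrecio intervaloPrecio puntoRecorte)

-- ===== LEMMAS AND PROOFS =====

-- Count of an element in the flatMap of replicate blocks over a nodup index list.
lemma count_flat_replicate (l : List Int) (xs : List Int) (h : xs.Nodup) (a : Int) :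
    List.count a (xs.flatMap (fun i => List.replicate (List.count i l) i))
      = if a ∈ xs then List.count a l else 0 := by
  induction xs with
  | nil => simp
  | cons i xs ih =>
    simp only [List.nodup_cons] at h
    rw [List.flatMap_cons, List.count_append, List.count_replicate, ih h.2]
    by_cases hia : i = a
    · subst hia
      simp [h.1]
    · simp [hia, Ne.symm hia, List.mem_cons]

-- Count of an element in a filtered list, both cases.
lemma count_filter_ite (l : List Int) (p : Int → Bool) (a : Int) :
    List.count a (l.filter p) = if p a then List.count a l else 0 := by
  by_cases hp : p a
  · rw [List.count_filter hp, if_pos hp]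
  · rw [if_neg hp, List.count_eq_zero]
    intro hmem
    exact hp (List.of_mem_filter hmem)

-- The flatMap of replicate blocks over range(0, m) is a permutation of the filtered list.
lemma flat_perm_filter (l : List Int) (m : Int) :
    ((PySem.List.pyRange 0 m 1).flatMap (fun i => List.replicate (List.count i l) i)).Perm
      (l.filter (fun x => decide (0 ≤ x) && decide (x < m))) := by
  rw [List.perm_iff_count]
  intro a
  rw [count_flat_replicate l _ (PySem.List.nodup_pyRange_one 0 m) a,
      count_filter_ite]
  by_cases hmem : a ∈ PySem.List.pyRange 0 m 1
  · have h := (PySem.List.mem_pyRange_one).1 hmem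
    simp [hmem, h.1, h.2]
  · have h := (not_iff_not.2 (PySem.List.mem_pyRange_one (x := a) (a := 0) (b := m))).1 hmem
    push Not at h
    rw [if_neg hmem]
    by_cases h0 : (0 : Int) ≤ a
    · simp [h0, not_lt.2 (h h0)]
    · simp [h0]

-- The flatMap of replicate blocks over range(0, m) is sorted (pairwise ≤).
lemma flat_pairwise (l : List Int) (m : Int) :
    ((PySem.List.pyRange 0 m 1).flatMap (fun i => List.replicate (List.count i l) i)).Pairwise (· ≤ ·) := by
  rw [List.pairwise_flatMap]
  constructor
  · intro a _
    rw [List.pairwise_replicate]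
    exact Or.inr le_rfl
  · refine (PySem.List.pairwise_lt_pyRange_one 0 m).imp ?_
    intro a b hab x hx y hy
    rw [List.eq_of_mem_replicate hx, List.eq_of_mem_replicate hy]
    exact le_of_lt hab

-- Main lemma: A's counting pass over range(0, m) equals B's filter-then-sort, for any limit m.
lemma counting_eq_sort (l : List Int) (m : Int) :
    (PySem.List.pyRange 0 m 1).foldl
        (fun acc i => acc ++ List.replicate (PySem.List.count l i) i) []
      = PySem.List.sorted (l.filter (fun x => decide (0 ≤ x) && decide (x < m))) (fun x => x) false := by
  have hc : (fun (acc : List Int) (i : Int) => acc ++ List.replicate (PySem.List.count l i) i)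
      = fun acc i => acc ++ List.replicate (List.count i l) i := by
    funext acc i
    simp [PySem.List.count]
  rw [hc, PySem.List.foldl_append_eq_flatMap, List.nil_append]
  exact (PySem.List.sorted_id_eq_of_perm_of_pairwise _ _ (flat_perm_filter l m) (flat_pairwise l m)).symm

-- A's first loop is just range(0, m) itself.
lemma collect_eq_range (m : Int) :
    (PySem.List.pyRange 0 m 1).foldl (fun acc i => acc ++ [i]) [] = PySem.List.pyRange 0 m 1 := by
  have := PySem.List.foldl_append_eq_flatMap (fun i => [i]) (PySem.List.pyRange 0 m 1) []
  simpa using this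

-- ===== VERDICT (by name: the statement is the Claim_ definition above) =====
theorem nuevoIndice_spec : Claim_equal_nuevoIndice := by
  intro alcista signoPositivo indicePrecio intervaloPrecio puntoRecorte _
  unfold Spec_nuevoIndice nuevoIndice nuevoIndice_alt
  cases alcista <;> cases signoPositivo <;>
    simp only [Bool.and_self, Bool.not_true, Bool.not_false, Bool.and_true, Bool.and_false,
      beq_self_eq_true, beq_iff_eq, reduceCtorEq, if_true, if_false, collect_eq_range] <;>
    exact counting_eq_sort indicePrecio _
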